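-- pv_equiv track=rewrite | github.com/bordasa/strength_programs | theBattleship_ORIGINAL.py | assign_reps
-- ===== SOURCE A (Python) =====
-- def assign_ladder(lift_RM: int):
--     match lift_RM:
--         case 4: return [1, 2, 3]
--         case 5: return [2, 3, 3]
--         case 6: return [2, 3, 4]
--         case 7: return [2, 4, 5]
--         case 8: return [3, 4, 5]
--         case 9: return [3, 5, 6]
--         case 10: return [3, 5, 7]
--         case 11: return [4, 6, 7]
--         case 12: return [4, 6, 8]
--         case 13: return [4, 7, 9]
--         case 14: return [5, 7, 9]
--         case 15: return [5, 8, 10]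
--
-- def assign_reps(lift_RM: int, nl: int):
--     rep_ladder = assign_ladder(lift_RM)
--     session_reps = []
--     while nl >= rep_ladder[0]:
--         for reps in rep_ladder:
--             session_reps.append(reps)
--             nl -= reps
--     if nl > 0:
--         session_reps.append(nl)
--
--     return session_reps
-- ===== SOURCE B (Python) =====
-- def assign_ladder(lift_RM: int):
--     match lift_RM:
--         case 4: return [1, 2, 3]
--         case 5: return [2, 3, 3]
--         case 6: return [2, 3, 4]
--         case 7: return [2, 4, 5]
--         case 8: return [3, 4, 5]
--         case 9: return [3, 5, 6]
--         case 10: return [3, 5, 7]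
--         case 11: return [4, 6, 7]
--         case 12: return [4, 6, 8]
--         case 13: return [4, 7, 9]
--         case 14: return [5, 7, 9]
--         case 15: return [5, 8, 10]
--
-- def assign_reps(lift_RM: int, nl: int):
--     rep_ladder = assign_ladder(lift_RM)
--     a = rep_ladder[0]
--     s = sum(rep_ladder)
--     k = (nl - a) // s + 1 if nl >= a else 0
--     session_reps = list(rep_ladder) * k
--     remainder = nl - k * s
--     if remainder > 0:
--         session_reps.append(remainder)
--     return session_reps
-- ===== Notes on version B (the rewrite author's own statement) =====
-- stated objective: faster
-- what changed: Replaces the subtract-until-below-threshold while loop with a closed-form cycle count k = (nl - a)//s + 1 and builds the output as ladder*k plus an optional remainder.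
import Mathlib
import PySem

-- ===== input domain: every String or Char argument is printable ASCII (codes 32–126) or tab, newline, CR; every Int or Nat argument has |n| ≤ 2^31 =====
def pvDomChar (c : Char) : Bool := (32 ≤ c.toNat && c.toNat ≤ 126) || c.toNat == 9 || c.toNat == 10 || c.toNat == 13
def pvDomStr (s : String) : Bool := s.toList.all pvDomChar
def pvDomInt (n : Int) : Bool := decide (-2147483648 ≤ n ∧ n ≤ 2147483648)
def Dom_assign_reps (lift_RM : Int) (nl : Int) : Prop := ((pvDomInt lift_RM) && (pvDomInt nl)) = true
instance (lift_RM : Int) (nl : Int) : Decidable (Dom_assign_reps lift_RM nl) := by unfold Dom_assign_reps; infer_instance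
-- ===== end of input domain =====

-- B replaces A's subtract-until-below while loop by a closed-form cycle count k and builds ladder*k plus an optional remainder (objective: faster, loop-free count).

-- ===== PORT A =====
-- Python's assign_ladder returns None for lift_RM outside 4..15 → Option here.
def assign_ladder (lift_RM : Int) : Option (List Int) :=
  if lift_RM = 4 then some [1, 2, 3]
  else if lift_RM = 5 then some [2, 3, 3]
  else if lift_RM = 6 then some [2, 3, 4]
  else if lift_RM = 7 then some [2, 4, 5]
  else if lift_RM = 8 then some [3, 4, 5]
  else if lift_RM = 9 then some [3, 5, 6]
  else if lift_RM = 10 then some [3, 5, 7]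
  else if lift_RM = 11 then some [4, 6, 7]
  else if lift_RM = 12 then some [4, 6, 8]
  else if lift_RM = 13 then some [4, 7, 9]
  else if lift_RM = 14 then some [5, 7, 9]
  else if lift_RM = 15 then some [5, 8, 10]
  else none

-- the while loop of A: each pass is the inner 'for reps in rep_ladder' fold (append, subtract).
-- fuel only makes the recursion total; it is never exhausted on the admitted inputs (ladder sum ≥ 6 > 0).
def assign_reps_loop (ladder : List Int) (fuel : Nat) (nl : Int) (acc : List Int) : List Int × Int :=
  match fuel with
  | 0 => (acc, nl)
  | fuel + 1 =>
    if ladder.head! ≤ nl then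
      let st := ladder.foldl (fun (p : List Int × Int) reps => (p.1 ++ [reps], p.2 - reps)) (acc, nl)
      assign_reps_loop ladder fuel st.2 st.1
    else (acc, nl)

def assign_reps (lift_RM : Int) (nl : Int) : List Int :=
  match assign_ladder lift_RM with
  | none => []  -- Python raises TypeError here (None[0]); excluded by Pre_
  | some rep_ladder =>
    let st := assign_reps_loop rep_ladder (nl.toNat + 1) nl []
    if st.2 > 0 then st.1 ++ [st.2] else st.1

-- ===== PORT B =====
def assign_reps_alt (lift_RM : Int) (nl : Int) : List Int :=
  match assign_ladder lift_RM with
  | none => []  -- Python raises TypeError here; excluded by Pre_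
  | some rep_ladder =>
    let a := rep_ladder.head!   -- rep_ladder[0]; ladder is always nonempty
    let s := rep_ladder.sum
    let k := if a ≤ nl then PySem.Int.floordiv (nl - a) s + 1 else 0
    let session_reps := (List.replicate k.toNat rep_ladder).flatten  -- list(rep_ladder) * k
    let remainder := nl - k * s
    if remainder > 0 then session_reps ++ [remainder] else session_reps

-- ===== PRECONDITION & SPEC =====
-- Pre_ excludes exactly the lift_RM outside 4..15, on which Python A raises TypeError (assign_ladder returns None, then None[0]).
def Pre_assign_reps (lift_RM : Int) (_nl : Int) : Prop := 4 ≤ lift_RM ∧ lift_RM ≤ 15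
instance (lift_RM : Int) (nl : Int) : Decidable (Pre_assign_reps lift_RM nl) := by unfold Pre_assign_reps; infer_instance
def pvWitness_assign_reps : Int × Int := (4, 10)

def Spec_assign_reps (lift_RM : Int) (nl : Int) (out : List Int) : Prop := out = assign_reps_alt lift_RM nl
instance (lift_RM : Int) (nl : Int) (out : List Int) : Decidable (Spec_assign_reps lift_RM nl out) := by unfold Spec_assign_reps; infer_instance

-- ===== CLAIM (what is proved, stated in full; the proofs are below) =====
def Claim_equal_assign_reps : Prop := ∀ (lift_RM : Int) (nl : Int), Dom_assign_reps lift_RM nl → Pre_assign_reps lift_RM nl → Spec_assign_reps lift_RM nl (assign_reps lift_RM nl)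

-- ===== LEMMAS AND PROOFS =====

-- the closed-form cycle count of B
def pvK (a s nl : Int) : Int := if a ≤ nl then PySem.Int.floordiv (nl - a) s + 1 else 0

lemma pv_fold_eq (l : List Int) (acc : List Int) (nl : Int) :
    l.foldl (fun (p : List Int × Int) reps => (p.1 ++ [reps], p.2 - reps)) (acc, nl)
      = (acc ++ l, nl - l.sum) := by
  induction l generalizing acc nl with
  | nil => simp
  | cons x xs ih =>
    simp only [List.foldl_cons, ih, List.sum_cons, List.append_assoc,
      Prod.mk.injEq, List.cons_append, List.nil_append]
    exact ⟨trivial, by ring⟩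

lemma pvK_step (a s nl : Int) (ha : 0 < a) (has : a ≤ s) (h : a ≤ nl) :
    pvK a s nl = pvK a s (nl - s) + 1 := by
  have hs : 0 < s := lt_of_lt_of_le ha has
  unfold pvK
  rw [if_pos h]
  by_cases h2 : a ≤ nl - s
  · rw [if_pos h2]
    have : nl - s - a = (nl - a) + (-1) * s := by ring
    rw [this, PySem.Int.floordiv_eq_ediv_of_pos hs, PySem.Int.floordiv_eq_ediv_of_pos hs,
      Int.add_mul_ediv_right _ _ (by omega : s ≠ 0)]
    ring
  · rw [if_neg h2]
    have h0 : PySem.Int.floordiv (nl - a) s = 0 := by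
      rw [PySem.Int.floordiv_eq_ediv_of_pos hs]
      exact Int.ediv_eq_zero_of_lt (by omega) (by omega)
    omega

lemma pvK_nonneg (a s nl : Int) (ha : 0 < a) (has : a ≤ s) : 0 ≤ pvK a s nl := by
  have hs : 0 < s := lt_of_lt_of_le ha has
  unfold pvK
  split_ifs with h
  · have : 0 ≤ PySem.Int.floordiv (nl - a) s := by
      rw [PySem.Int.floordiv_eq_ediv_of_pos hs]; exact Int.ediv_nonneg (by omega) (by omega)
    omega
  · omega

lemma pv_loop_eq (l : List Int) (ha : 0 < l.head!) (has : l.head! ≤ l.sum)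
    (fuel : Nat) (nl : Int) (acc : List Int) (hf : nl.toNat < fuel) :
    assign_reps_loop l fuel nl acc
      = (acc ++ (List.replicate (pvK l.head! l.sum nl).toNat l).flatten,
         nl - (pvK l.head! l.sum nl) * l.sum) := by
  induction fuel generalizing nl acc with
  | zero => omega
  | succ fuel ih =>
    rw [assign_reps_loop]
    by_cases h : l.head! ≤ nl
    · rw [if_pos h]
      simp only [pv_fold_eq]
      have hs : 0 < l.sum := lt_of_lt_of_le ha has
      have hf' : (nl - l.sum).toNat < fuel := by omega
      rw [ih (nl - l.sum) (acc ++ l) hf']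
      have hstep := pvK_step l.head! l.sum nl ha has h
      have hk0 : 0 ≤ pvK l.head! l.sum (nl - l.sum) := pvK_nonneg _ _ _ ha has
      have htn : (pvK l.head! l.sum (nl - l.sum) + 1).toNat
          = (pvK l.head! l.sum (nl - l.sum)).toNat + 1 := by omega
      rw [hstep, htn, List.replicate_succ, List.flatten_cons]
      simp only [Prod.mk.injEq]
      exact ⟨by simp [List.append_assoc], by ring⟩
    · rw [if_neg h]
      have : pvK l.head! l.sum nl = 0 := by unfold pvK; rw [if_neg h]
      simp [this]

lemma pv_body_eq (l : List Int) (ha : 0 < l.head!) (has : l.head! ≤ l.sum) (nl : Int) :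
    (let st := assign_reps_loop l (nl.toNat + 1) nl [];
     if st.2 > 0 then st.1 ++ [st.2] else st.1)
      = (let a := l.head!; let s := l.sum;
         let k := if a ≤ nl then PySem.Int.floordiv (nl - a) s + 1 else 0;
         let session_reps := (List.replicate k.toNat l).flatten;
         let remainder := nl - k * s;
         if remainder > 0 then session_reps ++ [remainder] else session_reps) := by
  have h := pv_loop_eq l ha has (nl.toNat + 1) nl [] (by omega)
  simp only [h, pvK]
  rfl

theorem pv_main (lift_RM nl : Int) (hp : Pre_assign_reps lift_RM nl) :
    assign_reps lift_RM nl = assign_reps_alt lift_RM nl := by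
  obtain ⟨h1, h2⟩ := hp
  unfold assign_reps assign_reps_alt
  interval_cases lift_RM <;>
    · simp only [assign_ladder, reduceIte]
      exact pv_body_eq _ (by decide) (by decide) nl

-- ===== VERDICT (by name: the statement is the Claim_ definition above) =====
theorem assign_reps_spec : Claim_equal_assign_reps := by
  intro lift_RM nl _ hp
  exact pv_main lift_RM nl hp
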